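-- pv_equiv track=rewrite | github.com/ivanamihalek/exolocator | el_utils/processes.py | partition_load
-- ===== SOURCE A (Python) =====
-- def partition_load(number_of_chunks, load_length):
-- 	partition = {}
-- 	load = []
-- 	for thr in range(number_of_chunks):
-- 		load.append(0)
--
-- 	for job in range (load_length):
-- 		load[(job%number_of_chunks)] += 1
--
-- 	total = 0
-- 	for ps in range (number_of_chunks):
-- 		ps_from = total
-- 		ps_to   = total + load[ps]
-- 		total  += load[ps]
--
-- 		if (ps_from >= load_length):
-- 			break
-- 		if (ps == number_of_chunks-1):
-- 			ps_to = load_length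
-- 		partition[ps] = [ps_from, ps_to]
-- 	return partition
-- ===== SOURCE B (Python) =====
-- def partition_load(number_of_chunks, load_length):
--     # Closed form: bucket ps holds q jobs plus one extra for the first r buckets,
--     # so its range starts at ps*q + min(ps, r); only min(chunks, load) buckets are emitted.
--     if number_of_chunks <= 0 or load_length <= 0:
--         return {}
--     q, r = divmod(load_length, number_of_chunks)
--     partition = {}
--     for ps in range(min(number_of_chunks, load_length)):
--         start = ps * q + min(ps, r)
--         partition[ps] = [start, start + q + (1 if ps < r else 0)]
--     return partition
-- ===== Notes on version B (the rewrite author's own statement) =====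
-- stated objective: alternative
-- what changed: B computes each chunk's job count and start offset in closed form via divmod (start = ps*q + min(ps, r)) and emits only the min(chunks, load) buckets, instead of A's per-job counting loop followed by a prefix-sum scan over all chunks.
import Mathlib
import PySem

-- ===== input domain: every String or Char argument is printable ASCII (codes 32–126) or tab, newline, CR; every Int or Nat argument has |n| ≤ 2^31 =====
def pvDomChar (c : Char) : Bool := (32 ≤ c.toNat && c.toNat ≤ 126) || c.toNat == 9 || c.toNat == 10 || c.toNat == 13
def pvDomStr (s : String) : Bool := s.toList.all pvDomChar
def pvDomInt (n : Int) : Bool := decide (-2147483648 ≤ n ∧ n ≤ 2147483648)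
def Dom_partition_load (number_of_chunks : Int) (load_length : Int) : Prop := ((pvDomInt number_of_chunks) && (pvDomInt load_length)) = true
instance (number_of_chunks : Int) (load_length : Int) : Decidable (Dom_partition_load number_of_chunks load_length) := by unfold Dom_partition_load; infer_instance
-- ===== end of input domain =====

-- B replaces A's per-job counting loop and prefix-sum scan by a floor-division closed form per chunk;
-- equivalence is proved on the inputs where A returns (number_of_chunks > 0 or load_length ≤ 0).

-- ===== PORT A =====
-- the growing Python list `load` is carried as an Array so the port evaluates in linear time;
-- `load.append(0)` is `push`, `load[i] += 1` is `pvIncr` (exact for 0 ≤ i < size, the only case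
-- reached inside Pre_; outside it Python raises, which Pre_ excludes)
def pvIncr (load : Array Int) (i : Int) : Array Int :=
  load.setIfInBounds i.toNat (load.getD i.toNat 0 + 1)

-- the third loop of A: `partition[ps] = [ps_from, ps_to]` always adds a FRESH key (ps is the loop
-- counter), so the dict is an insertion-ordered association list, accumulated reversed (cons) and
-- reversed once at the end for linear-time evaluation; `break` returns the accumulator early
def pvLoop3 (nc ll : Int) (load : Array Int) :
    List Int → Int → List (Int × List Int) → List (Int × List Int)
  | [], _, part => part
  | ps :: rest, total, part =>
    let lp := load.getD ps.toNat 0   -- load[ps]; 0 ≤ ps < size inside Pre_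
    let ps_from := total
    let ps_to := total + lp
    let total' := total + lp
    if ll ≤ ps_from then part
    else
      let ps_to' := if ps = nc - 1 then ll else ps_to
      pvLoop3 nc ll load rest total' ((ps, [ps_from, ps_to']) :: part)

def partition_load (number_of_chunks : Int) (load_length : Int) : List (Int × List Int) :=
  let load0 := (PySem.List.pyRange 0 number_of_chunks 1).foldl (fun l _ => l.push (0 : Int)) #[]
  let load := (PySem.List.pyRange 0 load_length 1).foldl
      (fun l job => pvIncr l (PySem.Int.mod job number_of_chunks)) load0
  (pvLoop3 number_of_chunks load_length load
      (PySem.List.pyRange 0 number_of_chunks 1) 0 []).reverse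

-- ===== PORT B =====
def partition_load_alt (number_of_chunks : Int) (load_length : Int) : List (Int × List Int) :=
  if number_of_chunks ≤ 0 ∨ load_length ≤ 0 then []
  else
    let q := PySem.Int.floordiv load_length number_of_chunks
    let r := PySem.Int.mod load_length number_of_chunks
    (PySem.List.pyRange 0 (min number_of_chunks load_length) 1).map (fun ps =>
      let start := ps * q + min ps r
      (ps, [start, start + q + (if ps < r then 1 else 0)]))

-- ===== PRECONDITION & SPEC =====
-- Pre_ excludes exactly the inputs where A raises: number_of_chunks ≤ 0 with load_length > 0
-- (ZeroDivisionError for 0, IndexError for a negative chunk count, both in the job loop).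
def Pre_partition_load (number_of_chunks : Int) (load_length : Int) : Prop :=
  0 < number_of_chunks ∨ load_length ≤ 0
instance (number_of_chunks : Int) (load_length : Int) : Decidable (Pre_partition_load number_of_chunks load_length) := by unfold Pre_partition_load; infer_instance
def pvWitness_partition_load : Int × Int := (3, 7)

def Spec_partition_load (number_of_chunks : Int) (load_length : Int) (out : List (Int × List Int)) : Prop := out = partition_load_alt number_of_chunks load_length
instance (number_of_chunks : Int) (load_length : Int) (out : List (Int × List Int)) : Decidable (Spec_partition_load number_of_chunks load_length out) := by unfold Spec_partition_load; infer_instance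

-- ===== CLAIM (what is proved, stated in full; the proofs are below) =====
def Claim_equal_partition_load : Prop := ∀ (number_of_chunks : Int) (load_length : Int), Dom_partition_load number_of_chunks load_length → Pre_partition_load number_of_chunks load_length → Spec_partition_load number_of_chunks load_length (partition_load number_of_chunks load_length)

-- ===== LEMMAS AND PROOFS =====

-- per-chunk job count after n jobs, c chunks
def pvCnt (c n i : Int) : Int := n / c + (if i < n % c then 1 else 0)

lemma pvArr_getD (a : Array Int) (i : Nat) (d : Int) : a.getD i d = a.toList.getD i d := by
  simp [Array.getD, List.getD]
  split
  · next hlt => simp [Array.getElem?_eq_getElem hlt, ← Array.getElem_toList]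
  · next hge => simp [Array.getElem?_eq_none (by omega : a.size ≤ i)]

lemma pvIncr_toList (a : Array Int) (i : Int) :
    (pvIncr a i).toList = a.toList.set i.toNat (a.toList.getD i.toNat 0 + 1) := by
  rw [pvIncr, Array.toList_setIfInBounds, pvArr_getD]

lemma pvZeros_toList (xs : List Int) :
    ∀ a : Array Int, (xs.foldl (fun l _ => l.push (0 : Int)) a).toList
      = a.toList ++ xs.map (fun _ => (0 : Int)) := by
  induction xs with
  | nil => intro a; simp
  | cons x xs ih =>
    intro a
    simp only [List.foldl_cons, List.map_cons]
    rw [ih, Array.toList_push]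
    simp

lemma pvCnt_step (c : Int) (hc : 0 < c) (n : Int) (i : Int)
    (hi0 : 0 ≤ i) (hic : i < c) :
    pvCnt c (n + 1) i = pvCnt c n i + (if i = n % c then 1 else 0) := by
  unfold pvCnt
  have hq : c * (n / c) + n % c = n := Int.mul_ediv_add_emod n c
  have hr0 : 0 ≤ n % c := Int.emod_nonneg n (by omega)
  have hrc : n % c < c := Int.emod_lt_of_pos n hc
  by_cases h : n % c + 1 < c
  · have h1 : (n+1) / c = n / c ∧ (n+1) % c = n % c + 1 :=
      (Int.ediv_emod_unique hc).mpr (by constructor; omega; omega)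
    rw [h1.1, h1.2]; split_ifs <;> omega
  · have h1 : (n+1) / c = n / c + 1 ∧ (n+1) % c = 0 :=
      (Int.ediv_emod_unique hc).mpr (by constructor; ring_nf; omega; omega)
    rw [h1.1, h1.2]; split_ifs <;> omega

lemma pvIncr_step (c : Int) (hc : 0 < c) (n : Int) (a : Array Int)
    (ha : a.toList = (PySem.List.pyRange 0 c 1).map (pvCnt c n)) :
    (pvIncr a (PySem.Int.mod n c)).toList
    = (PySem.List.pyRange 0 c 1).map (pvCnt c (n + 1)) := by
  rw [PySem.Int.mod_eq_emod_of_pos hc]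
  have hr0 : 0 ≤ n % c := Int.emod_nonneg n (by omega)
  have hrc : n % c < c := Int.emod_lt_of_pos n hc
  rw [pvIncr_toList a _, ha]
  apply List.ext_getElem
  · simp
  · intro k h1 h2
    have hkc : k < c.toNat := by simpa [PySem.List.length_pyRange_one] using h2
    have hidx : (n % c).toNat < ((PySem.List.pyRange 0 c 1).map (pvCnt c n)).length := by
      simp [PySem.List.length_pyRange_one]; omega
    rw [List.getElem_set]
    have hgd : ((PySem.List.pyRange 0 c 1).map (pvCnt c n)).getD (n % c).toNat 0
        = pvCnt c n ((n % c).toNat : Int) := by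
      rw [List.getD_eq_getElem _ _ hidx]
      simp [PySem.List.getElem_pyRange_one]
    simp only [hgd, List.getElem_map, PySem.List.getElem_pyRange_one]
    rw [pvCnt_step c hc n _ (by omega) (by omega)]
    split_ifs with hk h3 <;>
      first
        | rfl
        | omega
        | (have he : ((n % c).toNat : Int) = 0 + (k : Int) := by omega
           rw [he])

-- the two counting loops of A produce the closed-form per-chunk counts
lemma pvLoad_eq (c : Int) (hc : 0 < c) (n : Nat) :
    ((PySem.List.pyRange 0 (n : Int) 1).foldl
      (fun l job => pvIncr l (PySem.Int.mod job c))
      ((PySem.List.pyRange 0 c 1).foldl (fun l _ => l.push (0 : Int)) #[])).toList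
    = (PySem.List.pyRange 0 c 1).map (pvCnt c (n : Int)) := by
  induction n with
  | zero =>
    rw [show ((0 : Nat) : Int) = 0 from rfl,
        PySem.List.pyRange_one_eq_nil (a := 0) (b := 0) le_rfl]
    simp only [List.foldl_nil]
    rw [pvZeros_toList]
    simp only [List.nil_append]
    apply List.map_congr_left
    intro i hi
    have := (PySem.List.mem_pyRange_one.mp hi).1
    simp [pvCnt]
    omega
  | succ m ih =>
    have hcast : ((m + 1 : Nat) : Int) = (m : Int) + 1 := by push_cast; ring
    rw [hcast, PySem.List.pyRange_one_succ_right (by positivity), List.foldl_append]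
    simp only [List.foldl_cons, List.foldl_nil]
    exact pvIncr_step c hc (m : Int) _ ih

-- A's third loop, started at chunk s with the running prefix sum, emits B's closed-form pairs
lemma pvLoop3_eq (c l : Int) (hc : 0 < c) (hl : 0 < l)
    (load : Array Int) (hload : load.toList = (PySem.List.pyRange 0 c 1).map (pvCnt c l)) :
    ∀ (fuel : Nat) (s : Int), (c - s).toNat = fuel → 0 ≤ s → s ≤ c →
    ∀ acc : List (Int × List Int),
    pvLoop3 c l load (PySem.List.pyRange s c 1) (s * (l / c) + min s (l % c)) acc
    = ((PySem.List.pyRange s (min c l) 1).map (fun ps =>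
        (ps, [ps * (l / c) + min ps (l % c),
              ps * (l / c) + min ps (l % c) + pvCnt c l ps]))).reverse ++ acc := by
  intro fuel
  induction fuel with
  | zero =>
    intro s hfuel hs0 hsc acc
    have h1 : c ≤ s := by omega
    rw [PySem.List.pyRange_one_eq_nil h1,
        PySem.List.pyRange_one_eq_nil (le_trans (min_le_left c l) h1), pvLoop3]
    simp
  | succ m ih =>
    intro s hfuel hs0 hsc acc
    have hslt : s < c := by omega
    have hid : c * (l / c) + l % c = l := Int.mul_ediv_add_emod l c
    have hq0 : 0 ≤ l / c := Int.ediv_nonneg (by omega) (by omega)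
    have hr0 : 0 ≤ l % c := Int.emod_nonneg l (by omega)
    have hrc : l % c < c := Int.emod_lt_of_pos l hc
    have hlp : load.getD s.toNat 0 = pvCnt c l s := by
      rw [pvArr_getD, hload]
      have hidx : s.toNat < ((PySem.List.pyRange 0 c 1).map (pvCnt c l)).length := by
        simp [PySem.List.length_pyRange_one]; omega
      rw [List.getD_eq_getElem _ _ hidx]
      simp only [List.getElem_map, PySem.List.getElem_pyRange_one]
      rw [show (0 : Int) + (s.toNat : Int) = s by omega]
    rw [PySem.List.pyRange_one_cons hslt, pvLoop3]
    simp only [hlp]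
    by_cases hbrk : l ≤ s * (l / c) + min s (l % c)
    · rw [if_pos hbrk]
      have hE : min c l ≤ s := by
        by_cases hq : l / c = 0
        · have hcz : c * (l / c) = 0 := by rw [hq]; ring
          have hrl : l % c = l := by omega
          rw [hq, hrl] at hbrk
          simp only [mul_zero, zero_add] at hbrk
          have hls : l ≤ s := le_trans hbrk (min_le_left s l)
          exact le_trans (min_le_right c l) hls
        · exfalso
          have hq1 : 1 ≤ l / c := by omega
          have h1 : s * (l / c) ≤ (c - 1) * (l / c) :=
            mul_le_mul_of_nonneg_right (by omega) hq0
          have h2 : (c - 1) * (l / c) = c * (l / c) - l / c := by ring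
          have hm : min s (l % c) ≤ l % c := min_le_right _ _
          linarith
      rw [PySem.List.pyRange_one_eq_nil hE]
      simp
    · rw [if_neg hbrk]
      rw [not_le] at hbrk
      have hsl : s < l := by
        by_cases hq : l / c = 0
        · have hcz : c * (l / c) = 0 := by rw [hq]; ring
          have hrl : l % c = l := by omega
          rw [hq, hrl] at hbrk
          simp only [mul_zero, zero_add] at hbrk
          rcases min_cases s l with ⟨h1, h2⟩ | ⟨h1, h2⟩ <;> rw [h1] at hbrk <;> omega
        · have hq1 : 1 ≤ l / c := by omega
          have h1 : s * 1 ≤ s * (l / c) := mul_le_mul_of_nonneg_left (by omega) hs0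
          have hm : 0 ≤ min s (l % c) := le_min hs0 hr0
          linarith
      have hsmin : s < min c l := lt_min hslt hsl
      -- the inserted pair equals the closed-form pair
      have hpair : (if s = c - 1 then l
            else s * (l / c) + min s (l % c) + pvCnt c l s)
          = s * (l / c) + min s (l % c) + pvCnt c l s := by
        by_cases hlast : s = c - 1
        · rw [if_pos hlast]
          subst hlast
          unfold pvCnt
          have hmr : min (c - 1) (l % c) = l % c := min_eq_right (by omega)
          rw [hmr, if_neg (by omega : ¬ c - 1 < l % c)]
          have : (c - 1) * (l / c) = c * (l / c) - l / c := by ring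
          linarith
        · rw [if_neg hlast]
      -- the new running total is the closed form at s + 1
      have htot : s * (l / c) + min s (l % c) + pvCnt c l s
          = (s + 1) * (l / c) + min (s + 1) (l % c) := by
        unfold pvCnt
        have hr : (s + 1) * (l / c) = s * (l / c) + l / c := by ring
        by_cases hsr : s < l % c
        · rw [if_pos hsr, min_eq_left (by omega), min_eq_left (by omega)]
          linarith
        · rw [if_neg hsr, min_eq_right (by omega), min_eq_right (by omega)]
          linarith
      rw [hpair]
      nth_rewrite 1 [htot]
      rw [ih (s + 1) (by omega) (by omega) (by omega)]
      rw [PySem.List.pyRange_one_cons hsmin]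
      simp

-- ===== VERDICT (by name: the statement is the Claim_ definition above) =====
theorem partition_load_spec : Claim_equal_partition_load := by
  intro c l _ hpre
  unfold Spec_partition_load partition_load partition_load_alt
  dsimp only
  by_cases hl : l ≤ 0
  · rw [if_pos (Or.inr hl)]
    rw [PySem.List.pyRange_one_eq_nil (a := 0) (b := l) hl]
    simp only [List.foldl_nil]
    by_cases hc : c ≤ 0
    · rw [PySem.List.pyRange_one_eq_nil (a := 0) (b := c) hc, pvLoop3]
      rfl
    · rw [PySem.List.pyRange_one_cons (a := 0) (b := c) (by omega), pvLoop3]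
      rw [if_pos hl]
      rfl
  · have hc : 0 < c := by rcases hpre with h | h <;> omega
    have hl' : 0 ≤ l := by omega
    rw [if_neg (by omega : ¬ (c ≤ 0 ∨ l ≤ 0))]
    have hload : ((PySem.List.pyRange 0 l 1).foldl
        (fun a job => pvIncr a (PySem.Int.mod job c))
        ((PySem.List.pyRange 0 c 1).foldl (fun a _ => a.push (0 : Int)) #[])).toList
        = (PySem.List.pyRange 0 c 1).map (pvCnt c l) := by
      have h := pvLoad_eq c hc l.toNat
      rwa [Int.toNat_of_nonneg hl'] at h
    have h0 : (0 : Int) * (l / c) + min 0 (l % c) = 0 := by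
      rw [min_eq_left (Int.emod_nonneg l (by omega))]
      ring
    have hmain := pvLoop3_eq c l hc (by omega) _ hload (c - 0).toNat 0 rfl le_rfl (by omega) []
    rw [h0] at hmain
    rw [hmain]
    rw [PySem.Int.floordiv_eq_ediv_of_pos hc, PySem.Int.mod_eq_emod_of_pos hc]
    simp only [List.append_nil, List.reverse_reverse]
    apply List.map_congr_left
    intro ps _
    simp only [pvCnt, add_assoc]
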